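-- pv_equiv track=rewrite | github.com/qn06142/coding-python | divksubarr.py | find_len
-- ===== SOURCE A (Python) =====
-- def find_len(arr, n, m):
-- 	# Define the maximum values for maxN and maxM
-- 	maxN = 1000
-- 	maxM = 1000
--
-- 	# To store the states of DP
-- 	dp = [[0 for _ in range(maxM)] for _ in range(n + 1)]
--
-- 	# Base case
-- 	for curr in range(m):
-- 		if curr == 0:
-- 			dp[n][curr] = 0
-- 		else:
-- 			dp[n][curr] = -1
--
-- 	# Tabulation
-- 	for i in range(n - 1, -1, -1):
-- 		for curr in range(m):
-- 			# Recurrence relation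
-- 			l = dp[i + 1][curr]
-- 			r = dp[i + 1][(curr + arr[i]) % m]
-- 			dp[i][curr] = l
-- 			if r != -1:
-- 				dp[i][curr] = max(dp[i][curr], r + 1)
--
-- 	if dp[0][0] == -1:
-- 		return 0
-- 	else:
-- 		return dp[0][0]
-- ===== SOURCE B (Python) =====
-- def find_len(arr, n, m):
--     # Complement view: the longest kept subsequence equals n minus the FEWEST
--     # elements to remove so that the removed sum is congruent to the total sum
--     # mod m (removing everything always qualifies, so the answer is defined).
--     if m <= 0:
--         return 0
--     kept = [arr[i] for i in range(n)]
--     INF = n + 1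
--     cost = [0] + [INF] * (m - 1)  # cost[r] = fewest removals with removed-sum % m == r
--     for a in kept:
--         prev = cost
--         cost = [min(prev[r], prev[(r - a) % m] + 1) for r in range(m)]
--     return n - cost[sum(kept) % m]
-- ===== Notes on version B (the rewrite author's own statement) =====
-- stated objective: alternative
-- what changed: B solves the complementary problem: instead of A's backward 2D suffix DP maximising the number of KEPT elements with residue 0, B computes the fewest elements to REMOVE so the removed sum is congruent to the total sum mod m (a min-cost residue table over the removed multiset) and returns n minus that minimum; no -1/unreachable handling is needed since removing everything always works.
import Mathlib
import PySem

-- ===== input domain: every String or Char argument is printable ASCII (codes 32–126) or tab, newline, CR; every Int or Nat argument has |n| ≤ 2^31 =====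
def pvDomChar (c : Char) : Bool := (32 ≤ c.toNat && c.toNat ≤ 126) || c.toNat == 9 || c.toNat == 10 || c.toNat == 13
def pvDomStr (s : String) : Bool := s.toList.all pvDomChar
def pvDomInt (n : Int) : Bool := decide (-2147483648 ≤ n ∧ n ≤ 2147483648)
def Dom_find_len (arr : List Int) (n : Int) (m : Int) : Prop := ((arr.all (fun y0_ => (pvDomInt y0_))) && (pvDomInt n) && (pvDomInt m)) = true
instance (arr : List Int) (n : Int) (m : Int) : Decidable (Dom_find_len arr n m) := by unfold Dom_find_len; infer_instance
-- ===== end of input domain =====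

-- B solves the complementary problem (n minus the fewest removals making the removed sum
-- ≡ total sum mod m) instead of A's backward 2D max-kept suffix table (objective: alternative).


-- ===== PORT A =====
-- dp[i][j] read / write (2D list subscripts; all uses are in range under Pre_find_len)
def dpGet (dp : List (List Int)) (i j : Int) : Int :=
  PySem.List.pyGetD (PySem.List.pyGetD dp i []) j 0

def dpSet (dp : List (List Int)) (i j : Int) (v : Int) : List (List Int) :=
  PySem.List.pySetD dp i (PySem.List.pySetD (PySem.List.pyGetD dp i []) j v)

def find_len (arr : List Int) (n : Int) (m : Int) : Int :=
  -- maxN = 1000 is bound in A but never used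
  let maxM : Int := 1000
  -- dp = [[0]*maxM for _ in range(n+1)]
  let dp : List (List Int) :=
    (PySem.List.pyRange 0 (n + 1) 1).map (fun _ => (PySem.List.pyRange 0 maxM 1).map (fun _ => (0 : Int)))
  -- base case
  let dp := (PySem.List.pyRange 0 m 1).foldl
    (fun dp curr => dpSet dp n curr (if curr = 0 then 0 else -1)) dp
  -- tabulation
  let dp := (PySem.List.pyRange (n - 1) (-1) (-1)).foldl
    (fun dp i =>
      (PySem.List.pyRange 0 m 1).foldl
        (fun dp curr =>
          let l := dpGet dp (i + 1) curr
          let r := dpGet dp (i + 1) (PySem.Int.mod (curr + PySem.List.pyGetD arr i 0) m)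
          let dp := dpSet dp i curr l
          if r ≠ -1 then dpSet dp i curr (max (dpGet dp i curr) (r + 1)) else dp)
        dp)
    dp
  if dpGet dp 0 0 = -1 then 0 else dpGet dp 0 0

-- ===== PORT B =====
def find_len_alt (arr : List Int) (n : Int) (m : Int) : Int :=
  if m ≤ 0 then 0
  else
    let kept := (PySem.List.pyRange 0 n 1).map (fun i => PySem.List.pyGetD arr i 0)
    let inf : Int := n + 1
    let cost : List Int := [0] ++ List.replicate (m - 1).toNat inf
    let cost := kept.foldl
      (fun prev a =>
        (PySem.List.pyRange 0 m 1).map (fun r =>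
          min (PySem.List.pyGetD prev r 0)
              (PySem.List.pyGetD prev (PySem.Int.mod (r - a) m) 0 + 1)))
      cost
    n - PySem.List.pyGetD cost (PySem.Int.mod kept.sum m) 0

-- ===== PRECONDITION & SPEC =====
-- Pre_ excludes exactly the inputs where A raises: n < 0 (IndexError on dp[...]), m > 1000
-- (IndexError on dp[n][curr] past the hard-coded maxM = 1000 row width), and n > len(arr) when
-- 0 < m (IndexError on arr[i]; with m <= 0 no loop body runs and A returns 0).
def Pre_find_len (arr : List Int) (n : Int) (m : Int) : Prop :=
  0 ≤ n ∧ m ≤ 1000 ∧ (0 < m → n ≤ (arr.length : Int))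
instance (arr : List Int) (n : Int) (m : Int) : Decidable (Pre_find_len arr n m) := by
  unfold Pre_find_len; infer_instance

def pvWitness_find_len : List Int × Int × Int := ([3, 1, 2], 3, 3)

def Spec_find_len (arr : List Int) (n : Int) (m : Int) (out : Int) : Prop := out = find_len_alt arr n m
instance (arr : List Int) (n : Int) (m : Int) (out : Int) : Decidable (Spec_find_len arr n m out) := by
  unfold Spec_find_len; infer_instance

-- ===== CLAIM (what is proved, stated in full; the proofs are below) =====
def Claim_equal_find_len : Prop := ∀ (arr : List Int) (n : Int) (m : Int), Dom_find_len arr n m → Pre_find_len arr n m → Spec_find_len arr n m (find_len arr n m)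

-- ===== LEMMAS AND PROOFS =====

lemma pyRange_down_nil (a : Int) (h : a ≤ -1) : PySem.List.pyRange a (-1) (-1) = [] := by
  simp [PySem.List.pyRange, show ¬(-1:Int) < a by omega]

lemma pyRange_down_cons (a : Int) (h : 0 ≤ a) :
    PySem.List.pyRange a (-1) (-1) = a :: PySem.List.pyRange (a - 1) (-1) (-1) := by
  simp only [PySem.List.pyRange, if_neg (by norm_num : ¬(-1:Int) = 0)]
  norm_num
  rw [if_pos (by omega : (-1:Int) < a)]
  by_cases h2 : (0:Int) < a
  · rw [if_pos h2]
    have h4 : (a + 1).toNat = a.toNat + 1 := by omega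
    rw [h4, List.range_succ_eq_map, List.map_cons, List.map_map]
    congr 1
    · simp
    · apply List.map_congr_left; intro k _; simp; omega
  · rw [if_neg h2]
    have ha : a = 0 := by omega
    subst ha
    simp [List.range_succ]

lemma pyGetD_nonneg {α : Type} (xs : List α) (i : Int) (d : α) (h : 0 ≤ i) :
    PySem.List.pyGetD xs i d = xs.getD i.toNat d := by
  by_cases hlt : i < (xs.length : Int)
  · rw [PySem.List.pyGetD_eq_getElem xs d h hlt, List.getD_eq_getElem?_getD,
      List.getElem?_eq_getElem (by omega), Option.getD_some]
  · rw [PySem.List.pyGetD_of_none, List.getD_eq_getElem?_getD,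
      List.getElem?_eq_none (by omega), Option.getD_none]
    rw [PySem.List.pyGet?_eq_none_iff]
    simp [PySem.Raise.InRange]
    omega

lemma dpSet_eq (dp : List (List Int)) (i j v : Int) (hi : 0 ≤ i) (hj : 0 ≤ j) :
    dpSet dp i j v = dp.set i.toNat ((dp.getD i.toNat []).set j.toNat v) := by
  rw [dpSet, PySem.List.pySetD_of_nonneg _ _ hi, PySem.List.pySetD_of_nonneg _ _ hj,
    pyGetD_nonneg _ _ _ hi]

lemma dpGet_eq (dp : List (List Int)) (i j : Int) (hi : 0 ≤ i) (hj : 0 ≤ j) :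
    dpGet dp i j = (dp.getD i.toNat []).getD j.toNat 0 := by
  rw [dpGet, pyGetD_nonneg _ _ _ hi, pyGetD_nonneg _ _ _ hj]

lemma getD_set (xs : List (List Int)) (i k : Nat) (v : List Int) :
    (xs.set i v).getD k [] = if i = k ∧ i < xs.length then v else xs.getD k [] := by
  rw [List.getD_eq_getElem?_getD, List.getD_eq_getElem?_getD, List.getElem?_set]
  by_cases h1 : i = k
  · subst h1
    by_cases h2 : i < xs.length <;> simp [h2]
  · simp [h1]

lemma getD_set_int (xs : List Int) (i k : Nat) (v : Int) :
    (xs.set i v).getD k 0 = if i = k ∧ i < xs.length then v else xs.getD k 0 := by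
  rw [List.getD_eq_getElem?_getD, List.getD_eq_getElem?_getD, List.getElem?_set]
  by_cases h1 : i = k
  · subst h1
    by_cases h2 : i < xs.length <;> simp [h2]
  · simp [h1]

lemma dpSet_row_length (dp : List (List Int)) (i j v : Int) (hi : 0 ≤ i) (hj : 0 ≤ j) (k : Nat) :
    ((dpSet dp i j v).getD k []).length = (dp.getD k []).length := by
  rw [dpSet_eq _ _ _ _ hi hj, getD_set]
  by_cases h : i.toNat = k ∧ i.toNat < dp.length
  · rw [if_pos h, List.length_set]
    rw [h.1]
  · rw [if_neg h]

lemma dpGet_dpSet (dp : List (List Int)) (i j i' j' v : Int)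
    (hi : 0 ≤ i) (hj : 0 ≤ j) (hi' : 0 ≤ i') (hj' : 0 ≤ j')
    (hil : i.toNat < dp.length) (hjl : j.toNat < (dp.getD i.toNat []).length) :
    dpGet (dpSet dp i j v) i' j' = if i' = i ∧ j' = j then v else dpGet dp i' j' := by
  rw [dpSet_eq _ _ _ _ hi hj, dpGet_eq _ _ _ hi' hj', getD_set]
  by_cases h1 : i' = i
  · subst h1
    rw [if_pos ⟨rfl, hil⟩, getD_set_int]
    by_cases h2 : j' = j
    · subst h2
      rw [if_pos ⟨rfl, hjl⟩, if_pos ⟨rfl, rfl⟩]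
    · rw [if_neg (by omega), if_neg (by simp [h2])]
      exact (dpGet_eq _ _ _ (by omega) (by omega)).symm
  · rw [if_neg (by omega), if_neg (by simp [h1])]
    exact (dpGet_eq _ _ _ (by omega) (by omega)).symm

def bestPick (m : Int) : List Int → Int → Int
  | [], c => if c = 0 then 0 else -1
  | a :: l, c =>
    if bestPick m l ((c + a) % m) = -1 then bestPick m l c
    else max (bestPick m l c) (bestPick m l ((c + a) % m) + 1)

lemma bestPick_zero_nonneg (m : Int) (l : List Int) : 0 ≤ bestPick m l 0 := by
  induction l with
  | nil => simp [bestPick]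
  | cons a l ih =>
    simp only [bestPick]
    have h3 := le_max_left (bestPick m l 0) (bestPick m l ((0 + a) % m) + 1)
    split <;> omega

lemma emod_shift (x b m : Int) : (x % m + b) % m = (x + b) % m := by
  conv_rhs => rw [Int.add_emod]
  rw [Int.add_emod (x % m) b, Int.emod_emod_of_dvd _ (dvd_refl m)]

def dpDims (dp : List (List Int)) (N : Nat) : Prop :=
  dp.length = N ∧ ∀ k : Nat, k < N → (dp.getD k []).length = 1000

lemma dpDims_set (dp : List (List Int)) (N : Nat) (i j v : Int) (hi : 0 ≤ i) (hj : 0 ≤ j)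
    (hd : dpDims dp N) : dpDims (dpSet dp i j v) N := by
  constructor
  · rw [dpSet_eq _ _ _ _ hi hj, List.length_set, hd.1]
  · intro k hk
    rw [dpSet_row_length _ _ _ _ hi hj]
    exact hd.2 k hk

lemma baseFold (n m : Int) (N : Nat) (hn : 0 ≤ n) (hnN : n.toNat < N) (hm : m ≤ 1000) :
    ∀ (k : Nat) (lo : Int) (dp : List (List Int)), 0 ≤ lo → (m - lo).toNat = k → dpDims dp N →
      dpDims ((PySem.List.pyRange lo m 1).foldl
        (fun dp curr => dpSet dp n curr (if curr = 0 then 0 else -1)) dp) N ∧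
      ∀ i' j : Int, 0 ≤ i' → 0 ≤ j →
        dpGet ((PySem.List.pyRange lo m 1).foldl
          (fun dp curr => dpSet dp n curr (if curr = 0 then 0 else -1)) dp) i' j
          = if i' = n ∧ lo ≤ j ∧ j < m then (if j = 0 then 0 else -1) else dpGet dp i' j := by
  intro k
  induction k with
  | zero =>
    intro lo dp hlo hk hd
    rw [PySem.List.pyRange_one_eq_nil (by omega)]
    refine ⟨hd, ?_⟩
    intro i' j _ _
    rw [List.foldl_nil, if_neg (by omega)]
  | succ k ih =>
    intro lo dp hlo hk hd
    rw [PySem.List.pyRange_one_cons (by omega), List.foldl_cons]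
    have hd1 : dpDims (dpSet dp n lo (if lo = 0 then 0 else -1)) N :=
      dpDims_set dp N n lo _ hn hlo hd
    obtain ⟨hdf, hvals⟩ := ih (lo + 1) _ (by omega) (by omega) hd1
    refine ⟨hdf, ?_⟩
    intro i' j hi' hj
    rw [hvals i' j hi' hj]
    have hset := dpGet_dpSet dp n lo i' j (if lo = 0 then 0 else -1) hn hlo hi' hj
      (by rw [hd.1]; exact hnN) (by rw [hd.2 n.toNat hnN]; omega)
    by_cases hc : i' = n ∧ lo + 1 ≤ j ∧ j < m
    · rw [if_pos hc, if_pos (show i' = n ∧ lo ≤ j ∧ j < m from ⟨hc.1, by omega, hc.2.2⟩)]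
    · rw [if_neg hc, hset]
      by_cases hc2 : i' = n ∧ j = lo
      · rw [if_pos hc2, if_pos (show i' = n ∧ lo ≤ j ∧ j < m from ⟨hc2.1, by omega, by omega⟩), hc2.2]
      · rw [if_neg hc2, if_neg (show ¬(i' = n ∧ lo ≤ j ∧ j < m) by omega)]

lemma innerFold (arr : List Int) (i m : Int) (N : Nat) (hi : 0 ≤ i) (hiN : i.toNat < N)
    (hm : m ≤ 1000) :
    ∀ (k : Nat) (lo : Int) (dp : List (List Int)), 0 ≤ lo → (m - lo).toNat = k → dpDims dp N →
      dpDims ((PySem.List.pyRange lo m 1).foldl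
        (fun dp curr =>
          let l := dpGet dp (i + 1) curr
          let r := dpGet dp (i + 1) (PySem.Int.mod (curr + PySem.List.pyGetD arr i 0) m)
          let dp := dpSet dp i curr l
          if r ≠ -1 then dpSet dp i curr (max (dpGet dp i curr) (r + 1)) else dp) dp) N ∧
      ∀ i' j : Int, 0 ≤ i' → 0 ≤ j →
        dpGet ((PySem.List.pyRange lo m 1).foldl
          (fun dp curr =>
            let l := dpGet dp (i + 1) curr
            let r := dpGet dp (i + 1) (PySem.Int.mod (curr + PySem.List.pyGetD arr i 0) m)
            let dp := dpSet dp i curr l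
            if r ≠ -1 then dpSet dp i curr (max (dpGet dp i curr) (r + 1)) else dp) dp) i' j =
          if i' = i ∧ lo ≤ j ∧ j < m then
            (if dpGet dp (i + 1) (PySem.Int.mod (j + PySem.List.pyGetD arr i 0) m) = -1
             then dpGet dp (i + 1) j
             else max (dpGet dp (i + 1) j)
               (dpGet dp (i + 1) (PySem.Int.mod (j + PySem.List.pyGetD arr i 0) m) + 1))
          else dpGet dp i' j := by
  intro k
  induction k with
  | zero =>
    intro lo dp hlo hk hd
    rw [PySem.List.pyRange_one_eq_nil (by omega)]
    refine ⟨hd, ?_⟩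
    intro i' j _ _
    rw [List.foldl_nil, if_neg (show ¬(i' = i ∧ lo ≤ j ∧ j < m) by omega)]
  | succ k ih =>
    intro lo dp hlo hk hd
    have hmpos : 0 < m := by omega
    rw [PySem.List.pyRange_one_cons (by omega), List.foldl_cons]
    have hil : i.toNat < dp.length := by rw [hd.1]; exact hiN
    have hjl : lo.toNat < (dp.getD i.toNat []).length := by rw [hd.2 i.toNat hiN]; omega
    set l := dpGet dp (i + 1) lo with hl
    set r := dpGet dp (i + 1) (PySem.Int.mod (lo + PySem.List.pyGetD arr i 0) m) with hrdef
    set dpA := dpSet dp i lo l with hdpA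
    have hgA : ∀ i' j : Int, 0 ≤ i' → 0 ≤ j →
        dpGet dpA i' j = if i' = i ∧ j = lo then l else dpGet dp i' j := by
      intro i' j h1 h2
      exact dpGet_dpSet dp i lo i' j l hi hlo h1 h2 hil hjl
    have hdA : dpDims dpA N := dpDims_set dp N i lo l hi hlo hd
    have hgetA : dpGet dpA i lo = l := by
      rw [hgA i lo hi hlo, if_pos ⟨rfl, rfl⟩]
    have hrowA : ∀ x : Int, 0 ≤ x → dpGet dpA (i + 1) x = dpGet dp (i + 1) x := by
      intro x hx
      rw [hgA (i + 1) x (by omega) hx, if_neg (by omega)]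
    have hmodnn : 0 ≤ PySem.Int.mod (lo + PySem.List.pyGetD arr i 0) m :=
      PySem.Int.mod_nonneg _ hmpos
    by_cases hr : r = -1
    · rw [show (if r ≠ -1 then dpSet dpA i lo (max (dpGet dpA i lo) (r + 1)) else dpA) = dpA
        from if_neg (by simp [hr])]
      obtain ⟨hdf, hv⟩ := ih (lo + 1) dpA (by omega) (by omega) hdA
      refine ⟨hdf, ?_⟩
      intro i' j hi' hj
      rw [hv i' j hi' hj]
      by_cases hc : i' = i ∧ lo + 1 ≤ j ∧ j < m
      · rw [if_pos hc, if_pos (show i' = i ∧ lo ≤ j ∧ j < m from ⟨hc.1, by omega, hc.2.2⟩),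
          hrowA j hj, hrowA _ (PySem.Int.mod_nonneg _ hmpos)]
      · rw [if_neg hc, hgA i' j hi' hj]
        by_cases hc2 : i' = i ∧ j = lo
        · rw [if_pos hc2, if_pos (show i' = i ∧ lo ≤ j ∧ j < m from ⟨hc2.1, by omega, by omega⟩),
            hc2.2]
          rw [← hrdef, if_pos hr]
        · rw [if_neg hc2, if_neg (show ¬(i' = i ∧ lo ≤ j ∧ j < m) by omega)]
    · rw [show (if r ≠ -1 then dpSet dpA i lo (max (dpGet dpA i lo) (r + 1)) else dpA)
        = dpSet dpA i lo (max l (r + 1)) by rw [if_pos hr, hgetA]]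
      have hilA : i.toNat < dpA.length := by rw [hdA.1]; exact hiN
      have hjlA : lo.toNat < (dpA.getD i.toNat []).length := by rw [hdA.2 i.toNat hiN]; omega
      set dpB := dpSet dpA i lo (max l (r + 1)) with hdpB
      have hdB : dpDims dpB N := dpDims_set dpA N i lo _ hi hlo hdA
      have hgB : ∀ i' j : Int, 0 ≤ i' → 0 ≤ j →
          dpGet dpB i' j = if i' = i ∧ j = lo then max l (r + 1) else dpGet dp i' j := by
        intro i' j h1 h2
        rw [hdpB, dpGet_dpSet dpA i lo i' j _ hi hlo h1 h2 hilA hjlA]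
        by_cases hc : i' = i ∧ j = lo
        · rw [if_pos hc, if_pos hc]
        · rw [if_neg hc, if_neg hc, hgA i' j h1 h2, if_neg hc]
      have hrowB : ∀ x : Int, 0 ≤ x → dpGet dpB (i + 1) x = dpGet dp (i + 1) x := by
        intro x hx
        rw [hgB (i + 1) x (by omega) hx, if_neg (by omega)]
      obtain ⟨hdf, hv⟩ := ih (lo + 1) dpB (by omega) (by omega) hdB
      refine ⟨hdf, ?_⟩
      intro i' j hi' hj
      rw [hv i' j hi' hj]
      by_cases hc : i' = i ∧ lo + 1 ≤ j ∧ j < m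
      · rw [if_pos hc, if_pos (show i' = i ∧ lo ≤ j ∧ j < m from ⟨hc.1, by omega, hc.2.2⟩),
          hrowB j hj, hrowB _ (PySem.Int.mod_nonneg _ hmpos)]
      · rw [if_neg hc, hgB i' j hi' hj]
        by_cases hc2 : i' = i ∧ j = lo
        · rw [if_pos hc2, if_pos (show i' = i ∧ lo ≤ j ∧ j < m from ⟨hc2.1, by omega, by omega⟩),
            hc2.2]
          rw [← hrdef, if_neg hr, ← hl]
        · rw [if_neg hc2, if_neg (show ¬(i' = i ∧ lo ≤ j ∧ j < m) by omega)]

lemma outerFold (arr : List Int) (n m : Int) (N : Nat) (hn : 0 ≤ n) (hN : N = (n + 1).toNat)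
    (hmpos : 0 < m) (hm : m ≤ 1000) (hlen : n ≤ (arr.length : Int)) :
    ∀ (k : Nat) (i0 : Int) (dp : List (List Int)), -1 ≤ i0 → i0 ≤ n - 1 → (i0 + 1).toNat = k →
      dpDims dp N →
      (∀ kk : Int, i0 < kk → kk ≤ n → ∀ j : Int, 0 ≤ j → j < m →
        dpGet dp kk j = bestPick m ((arr.take n.toNat).drop kk.toNat) j) →
      ∀ kk : Int, 0 ≤ kk → kk ≤ n → ∀ j : Int, 0 ≤ j → j < m →
        dpGet ((PySem.List.pyRange i0 (-1) (-1)).foldl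
          (fun dp i =>
            (PySem.List.pyRange 0 m 1).foldl
              (fun dp curr =>
                let l := dpGet dp (i + 1) curr
                let r := dpGet dp (i + 1) (PySem.Int.mod (curr + PySem.List.pyGetD arr i 0) m)
                let dp := dpSet dp i curr l
                if r ≠ -1 then dpSet dp i curr (max (dpGet dp i curr) (r + 1)) else dp) dp) dp) kk j
          = bestPick m ((arr.take n.toNat).drop kk.toNat) j := by
  intro k
  induction k with
  | zero =>
    intro i0 dp h0 h1 hk hd hrows kk hkk0 hkkn j hj hjm
    have hi0 : i0 = -1 := by omega
    subst hi0
    rw [pyRange_down_nil (-1) (by omega), List.foldl_nil]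
    exact hrows kk (by omega) hkkn j hj hjm
  | succ k ih =>
    intro i0 dp h0 h1 hk hd hrows kk hkk0 hkkn j hj hjm
    have hi00 : 0 ≤ i0 := by omega
    rw [pyRange_down_cons i0 hi00, List.foldl_cons]
    have hiN : i0.toNat < N := by omega
    obtain ⟨hdf, hv⟩ := innerFold arr i0 m N hi00 hiN hm (m - 0).toNat 0 dp (by omega) rfl hd
    refine ih (i0 - 1) _ (by omega) (by omega) (by omega) hdf ?_ kk hkk0 hkkn j hj hjm
    intro kk2 hkk2 hkk2n j2 hj2 hj2m
    rw [hv kk2 j2 (by omega) hj2]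
    by_cases hc : kk2 = i0 ∧ 0 ≤ j2 ∧ j2 < m
    · rw [if_pos hc]
      -- row i0 is freshly computed from row i0+1
      have hdrop : (arr.take n.toNat).drop i0.toNat
          = arr[i0.toNat] :: (arr.take n.toNat).drop (i0.toNat + 1) := by
        rw [List.drop_eq_getElem_cons (by
          rw [List.length_take]; omega)]
        congr 1
        rw [List.getElem_take]
      have ha : PySem.List.pyGetD arr i0 0 = arr[i0.toNat] := by
        rw [pyGetD_nonneg arr i0 0 hi00, List.getD_eq_getElem?_getD,
          List.getElem?_eq_getElem (by omega), Option.getD_some]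
      have hup : dpGet dp (i0 + 1) j2 = bestPick m ((arr.take n.toNat).drop (i0.toNat + 1)) j2 := by
        rw [hrows (i0 + 1) (by omega) (by omega) j2 hj2 hj2m]
        congr 2
        omega
      have hmod := PySem.Int.mod_nonneg (j2 + PySem.List.pyGetD arr i0 0) hmpos
      have hmodlt := PySem.Int.mod_lt (j2 + PySem.List.pyGetD arr i0 0) hmpos
      have hup2 : dpGet dp (i0 + 1) (PySem.Int.mod (j2 + PySem.List.pyGetD arr i0 0) m)
          = bestPick m ((arr.take n.toNat).drop (i0.toNat + 1))
              (PySem.Int.mod (j2 + PySem.List.pyGetD arr i0 0) m) := by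
        rw [hrows (i0 + 1) (by omega) (by omega) _ hmod hmodlt]
        congr 2
        omega
      rw [hc.1, hdrop]
      simp only [bestPick]
      rw [hup, hup2, ha, PySem.Int.mod_eq_emod_of_pos hmpos]
    · rw [if_neg hc]
      exact hrows kk2 (by omega) hkk2n j2 hj2 hj2m

lemma getD_replicate_int (nn : Nat) (v : Int) (k : Nat) (d : Int) :
    (List.replicate nn v).getD k d = if k < nn then v else d := by
  rw [List.getD_eq_getElem?_getD, List.getElem?_replicate]
  by_cases h : k < nn <;> simp [h]

lemma getD_replicate_row (nn : Nat) (v : List Int) (k : Nat) :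
    (List.replicate nn v).getD k [] = if k < nn then v else [] := by
  rw [List.getD_eq_getElem?_getD, List.getElem?_replicate]
  by_cases h : k < nn <;> simp [h]

lemma dp0_eq (n : Int) :
    (PySem.List.pyRange 0 (n + 1) 1).map
      (fun _ => (PySem.List.pyRange 0 1000 1).map (fun _ => (0 : Int)))
    = List.replicate (n + 1).toNat (List.replicate 1000 0) := by
  rw [List.map_const', List.map_const', PySem.List.length_pyRange_one,
    PySem.List.length_pyRange_one]
  have h1 : ((n : Int) + 1 - 0).toNat = (n + 1).toNat := by omega
  rw [h1, show Int.toNat (1000 - 0) = 1000 from rfl]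

lemma dp0_dims (n : Int) :
    dpDims ((PySem.List.pyRange 0 (n + 1) 1).map
      (fun _ => (PySem.List.pyRange 0 1000 1).map (fun _ => (0 : Int)))) (n + 1).toNat := by
  rw [dp0_eq]
  constructor
  · rw [List.length_replicate]
  · intro k hk
    rw [getD_replicate_row, if_pos hk, List.length_replicate]

lemma dp0_get (n i j : Int) (hi : 0 ≤ i) (hj : 0 ≤ j) :
    dpGet ((PySem.List.pyRange 0 (n + 1) 1).map
      (fun _ => (PySem.List.pyRange 0 1000 1).map (fun _ => (0 : Int)))) i j = 0 := by
  rw [dp0_eq, dpGet_eq _ _ _ hi hj, getD_replicate_row]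
  by_cases h : i.toNat < (n + 1).toNat
  · rw [if_pos h, getD_replicate_int]
    split <;> rfl
  · rw [if_neg h]
    simp

lemma find_len_zero (arr : List Int) (n m : Int) (hm : m ≤ 0) :
    find_len arr n m = 0 := by
  unfold find_len
  simp only [PySem.List.pyRange_one_eq_nil (show m ≤ 0 from hm), List.foldl_nil,
    List.foldl_fixed]
  rw [dp0_get n 0 0 le_rfl le_rfl]
  norm_num

lemma find_len_pos (arr : List Int) (n m : Int) (hn : 0 ≤ n) (hlen : n ≤ (arr.length : Int))
    (hm1 : 0 < m) (hm : m ≤ 1000) : find_len arr n m = bestPick m (arr.take n.toNat) 0 := by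
  unfold find_len
  dsimp only
  obtain ⟨hd1, hv1⟩ := baseFold n m (n + 1).toNat hn (by omega) hm (m - 0).toNat 0
    ((PySem.List.pyRange 0 (n + 1) 1).map
      (fun _ => (PySem.List.pyRange 0 1000 1).map (fun _ => (0 : Int))))
    le_rfl rfl (dp0_dims n)
  have hrows : ∀ kk : Int, n - 1 < kk → kk ≤ n → ∀ j : Int, 0 ≤ j → j < m →
      dpGet ((PySem.List.pyRange 0 m 1).foldl
        (fun dp curr => dpSet dp n curr (if curr = 0 then 0 else -1))
        ((PySem.List.pyRange 0 (n + 1) 1).map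
          (fun _ => (PySem.List.pyRange 0 1000 1).map (fun _ => (0 : Int))))) kk j
      = bestPick m ((arr.take n.toNat).drop kk.toNat) j := by
    intro kk hkk1 hkk2 j hj hjm
    have hkkn : kk = n := by omega
    rw [hkkn]
    rw [hv1 n j (by omega) hj, if_pos ⟨rfl, by omega, hjm⟩]
    have hdrop : (arr.take n.toNat).drop n.toNat = [] := by
      apply List.drop_eq_nil_of_le
      rw [List.length_take]
      omega
    rw [hdrop]
    simp [bestPick]
  have hfin := outerFold arr n m (n + 1).toNat hn rfl hm1 hm hlen (n - 1 + 1).toNat (n - 1) _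
    (by omega) (by omega) rfl hd1 hrows 0 le_rfl hn 0 le_rfl hm1
  rw [show Int.toNat 0 = 0 from rfl, List.drop_zero] at hfin
  rw [hfin, if_neg (by have := bestPick_zero_nonneg m (arr.take n.toNat); omega)]

-- ===== B-side: minimum-removal characterization =====

-- omin: min on Option Int with none = +infinity
def omin : Option Int → Option Int → Option Int
  | none, y => y
  | some a, none => some a
  | some a, some b => some (min a b)

-- minDrop? m l r = minimum size of a sub-multiset of l whose sum ≡ r (mod m), none if none exists
def minDrop? (m : Int) : List Int → Int → Option Int
  | [], r => if r = 0 then some 0 else none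
  | a :: l, r => omin (Option.map (· + 1) (minDrop? m l ((r - a) % m))) (minDrop? m l r)

lemma minDrop?_le (m : Int) (l : List Int) (r : Int) :
    ∀ k, minDrop? m l r = some k → k ≤ (l.length : Int) := by
  induction l generalizing r with
  | nil =>
    intro k hk
    simp only [minDrop?] at hk
    split at hk <;> simp_all
  | cons a l ih =>
    intro k hk
    simp only [minDrop?] at hk
    cases h1 : minDrop? m l ((r - a) % m) with
    | none =>
      cases h2 : minDrop? m l r with
      | none => rw [h1, h2] at hk; simp [omin] at hk
      | some k2 =>
        rw [h1, h2] at hk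
        simp only [Option.map_none, omin] at hk
        have := ih r k2 h2
        simp at hk
        subst hk
        simp
        omega
    | some k1 =>
      cases h2 : minDrop? m l r with
      | none =>
        rw [h1, h2] at hk
        simp only [Option.map_some, omin] at hk
        have := ih ((r - a) % m) k1 h1
        simp at hk
        subst hk
        simp
        omega
      | some k2 =>
        rw [h1, h2] at hk
        simp only [Option.map_some, omin] at hk
        have t1 := ih ((r - a) % m) k1 h1
        have t2 := ih r k2 h2
        simp at hk
        subst hk
        simp [min_def]
        split <;> omega

lemma minDrop?_snoc (m : Int) (l : List Int) (a r : Int) :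
    minDrop? m (l ++ [a]) r =
      omin (Option.map (· + 1) (minDrop? m l ((r - a) % m))) (minDrop? m l r) := by
  induction l generalizing r with
  | nil => simp [minDrop?]
  | cons b l ih =>
    simp only [List.cons_append, minDrop?]
    rw [ih, ih]
    have e1 : ((r - b) % m - a) % m = (r - b - a) % m := by
      have := emod_shift (r - b) (-a) m
      simpa [sub_eq_add_neg] using this
    have e2 : ((r - a) % m - b) % m = (r - a - b) % m := by
      have := emod_shift (r - a) (-b) m
      simpa [sub_eq_add_neg] using this
    have e3 : r - b - a = r - a - b := by ring
    rw [e1, e2, e3]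
    cases minDrop? m l ((r - a - b) % m) <;> cases minDrop? m l ((r - b) % m) <;>
      cases minDrop? m l ((r - a) % m) <;> cases minDrop? m l r <;>
      simp [omin, min_def] <;> omega

lemma minDrop?_total (m : Int) (l : List Int) :
    ∃ k, minDrop? m l (l.sum % m) = some k := by
  induction l with
  | nil => exact ⟨0, by simp [minDrop?]⟩
  | cons a l ih =>
    obtain ⟨k, hk⟩ := ih
    simp only [minDrop?, List.sum_cons]
    have e : ((a + l.sum) % m - a) % m = l.sum % m := by
      have h := emod_shift (a + l.sum) (-a) m
      rw [sub_eq_add_neg, h]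
      congr 1
      ring
    rw [e, hk]
    cases minDrop? m l ((a + l.sum) % m) <;> exact ⟨_, rfl⟩

-- the bridge: A's max-kept DP value = |l| - min removals hitting residue (c + sum l) % m
def bpOf (L : Int) : Option Int → Int
  | none => -1
  | some k => L - k

lemma bestPick_eq_minDrop (m : Int) (hm : 0 < m) (l : List Int) :
    ∀ c : Int, 0 ≤ c → c < m →
      bestPick m l c = bpOf (l.length : Int) (minDrop? m l ((c + l.sum) % m)) := by
  induction l with
  | nil =>
    intro c hc hcm
    simp only [bestPick, minDrop?, List.sum_nil, List.length_nil, add_zero]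
    rw [Int.emod_eq_of_lt hc hcm]
    by_cases h : c = 0 <;> simp [h, bpOf]
  | cons a l ih =>
    intro c hc hcm
    have hsum : (c + (a :: l).sum) % m = (c + a + l.sum) % m := by
      rw [List.sum_cons]; ring_nf
    simp only [bestPick]
    rw [hsum]
    simp only [minDrop?]
    have e1 : ((c + a + l.sum) % m - a) % m = (c + l.sum) % m := by
      have h := emod_shift (c + a + l.sum) (-a) m
      rw [sub_eq_add_neg, h]
      congr 1
      ring
    rw [e1]
    have hca0 : 0 ≤ (c + a) % m := Int.emod_nonneg _ (by omega)
    have hcam : (c + a) % m < m := Int.emod_lt_of_pos _ hm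
    have ihk := ih ((c + a) % m) hca0 hcam
    have e2 : ((c + a) % m + l.sum) % m = (c + a + l.sum) % m := emod_shift (c + a) l.sum m
    rw [e2] at ihk
    rw [ih c hc hcm, ihk]
    cases h1 : minDrop? m l ((c + l.sum) % m) with
    | none =>
      cases h2 : minDrop? m l ((c + a + l.sum) % m) with
      | none =>
        simp only [bpOf, omin, Option.map_none, List.length_cons, max_def]
        first | (split_ifs <;> omega) | omega
      | some k2 =>
        have hb2 := minDrop?_le m l _ _ h2
        simp only [bpOf, omin, Option.map_none, List.length_cons, max_def]
        push_cast
        first | (split_ifs <;> omega) | omega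
    | some k1 =>
      have hb1 := minDrop?_le m l _ _ h1
      cases h2 : minDrop? m l ((c + a + l.sum) % m) with
      | none =>
        simp only [bpOf, omin, Option.map_some, Option.map_none, List.length_cons, max_def]
        push_cast
        first | (split_ifs <;> omega) | omega
      | some k2 =>
        have hb2 := minDrop?_le m l _ _ h2
        simp only [bpOf, omin, Option.map_some, List.length_cons, max_def, min_def]
        push_cast
        first | (split_ifs <;> omega) | omega

-- the sentinel used by B's port: n+1 stands for "unreachable"
def sentB (n : Int) : Option Int → Int
  | none => n + 1
  | some k => k

lemma bFoldInv (m n : Int) (hm : 0 < m) :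
    ∀ (rest P : List Int) (cost : List Int),
      ((P.length : Int) + rest.length ≤ n) →
      (∀ r : Int, 0 ≤ r → r < m → PySem.List.pyGetD cost r 0 = sentB n (minDrop? m P r)) →
      ∀ r : Int, 0 ≤ r → r < m →
        PySem.List.pyGetD
          (rest.foldl
            (fun prev a =>
              (PySem.List.pyRange 0 m 1).map (fun r =>
                min (PySem.List.pyGetD prev r 0)
                    (PySem.List.pyGetD prev (PySem.Int.mod (r - a) m) 0 + 1)))
            cost) r 0
        = sentB n (minDrop? m (P ++ rest) r) := by
  intro rest
  induction rest with
  | nil =>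
    intro P cost _ hinv r h0 h1
    rw [List.foldl_nil, List.append_nil]
    exact hinv r h0 h1
  | cons a rest ih =>
    intro P cost hlen hinv r h0 h1
    rw [List.foldl_cons]
    have hstep : ∀ r : Int, 0 ≤ r → r < m →
        PySem.List.pyGetD
          ((PySem.List.pyRange 0 m 1).map (fun r =>
            min (PySem.List.pyGetD cost r 0)
                (PySem.List.pyGetD cost (PySem.Int.mod (r - a) m) 0 + 1))) r 0
        = sentB n (minDrop? m (P ++ [a]) r) := by
      intro r h0 h1
      rw [PySem.List.pyGetD_map_pyRange_of_nonneg _ m r 0 h0 h1]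
      have hmod0 := PySem.Int.mod_nonneg (r - a) hm
      have hmod1 := PySem.Int.mod_lt (r - a) hm
      rw [hinv r h0 h1, hinv _ hmod0 hmod1, minDrop?_snoc,
        PySem.Int.mod_eq_emod_of_pos hm]
      have hPlen : (P.length : Int) ≤ n - 1 := by
        simp only [List.length_cons] at hlen
        push_cast at hlen ⊢
        omega
      cases hx : minDrop? m P ((r - a) % m) with
      | none =>
        cases hy : minDrop? m P r with
        | none => simp [omin, sentB, min_def]; try omega
        | some k2 =>
          have := minDrop?_le m P r k2 hy
          simp [omin, sentB, min_def]
          try omega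
      | some k1 =>
        have t1 := minDrop?_le m P _ k1 hx
        cases hy : minDrop? m P r with
        | none => simp [omin, sentB, min_def]; try omega
        | some k2 =>
          have t2 := minDrop?_le m P r k2 hy
          simp [omin, sentB, min_def]
          try omega
    have hlen' : ((P ++ [a]).length : Int) + rest.length ≤ n := by
      simp only [List.length_append, List.length_cons, List.length_nil] at hlen ⊢
      push_cast at hlen ⊢
      omega
    have := ih (P ++ [a]) _ hlen' hstep r h0 h1
    rw [List.append_assoc] at this
    simpa using this

lemma find_len_alt_pos (arr : List Int) (n m : Int) (hn : 0 ≤ n)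
    (hlen : n ≤ (arr.length : Int)) (hm : 0 < m) :
    find_len_alt arr n m
      = n - sentB n (minDrop? m (arr.take n.toNat) ((arr.take n.toNat).sum % m)) := by
  unfold find_len_alt
  rw [if_neg (by omega)]
  dsimp only
  have hkept : (PySem.List.pyRange 0 n 1).map (fun i => PySem.List.pyGetD arr i 0)
      = arr.take n.toNat := by
    rw [PySem.List.pyRange_one, List.map_map]
    apply List.ext_getElem
    · simp [List.length_take]
      omega
    · intro k hk1 hk2
      simp only [List.getElem_map, List.getElem_range, Function.comp_apply]
      rw [List.getElem_take]
      have hkl : k < arr.length := by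
        simp at hk1
        omega
      rw [zero_add, pyGetD_nonneg arr (k : Int) 0 (by omega)]
      rw [List.getD_eq_getElem?_getD, Int.toNat_natCast,
        List.getElem?_eq_getElem hkl, Option.getD_some]
  rw [hkept]
  have hinit : ∀ r : Int, 0 ≤ r → r < m →
      PySem.List.pyGetD ([0] ++ List.replicate (m - 1).toNat (n + 1)) r 0
        = sentB n (minDrop? m [] r) := by
    intro r h0 h1
    rw [pyGetD_nonneg _ _ _ h0]
    by_cases hr : r = 0
    · subst hr
      simp [minDrop?, sentB]
    · have : ∃ u : Nat, r.toNat = u + 1 := ⟨r.toNat - 1, by omega⟩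
      obtain ⟨u, hu⟩ := this
      rw [hu, List.singleton_append, List.getD_cons_succ, getD_replicate_int, if_pos (by omega)]
      simp [minDrop?, sentB, hr]
  have hlen0 : ((([] : List Int).length : Int) + (arr.take n.toNat).length ≤ n) := by
    have h := List.length_take_le n.toNat arr
    simp only [List.length_nil, Nat.cast_zero, zero_add]
    omega
  have hfold := bFoldInv m n hm (arr.take n.toNat) [] _ hlen0 hinit
  have hmod0 := PySem.Int.mod_nonneg (arr.take n.toNat).sum hm
  have hmod1 := PySem.Int.mod_lt (arr.take n.toNat).sum hm
  rw [hfold _ hmod0 hmod1, List.nil_append, PySem.Int.mod_eq_emod_of_pos hm]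

-- ===== VERDICT (by name: the statement is the Claim_ definition above) =====
theorem find_len_spec : Claim_equal_find_len := by
  intro arr n m _ hpre
  obtain ⟨hn, hm, hlen⟩ := hpre
  unfold Spec_find_len
  by_cases hm1 : m ≤ 0
  · rw [find_len_zero arr n m hm1]
    unfold find_len_alt
    rw [if_pos hm1]
  · have hmpos : 0 < m := by omega
    have hlen' := hlen hmpos
    rw [find_len_pos arr n m hn hlen' hmpos hm,
      find_len_alt_pos arr n m hn hlen' hmpos,
      bestPick_eq_minDrop m hmpos (arr.take n.toNat) 0 le_rfl hmpos]
    have hkl : ((arr.take n.toNat).length : Int) = n := by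
      rw [List.length_take]
      omega
    have hz : ((0 : Int) + (arr.take n.toNat).sum) % m = (arr.take n.toNat).sum % m := by
      rw [zero_add]
    rw [hz]
    obtain ⟨k, hk⟩ := minDrop?_total m (arr.take n.toNat)
    rw [hk]
    simp only [bpOf, sentB]
    omega
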